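-- pv_equiv track=rewrite | github.com/Elenchus/department_code | pbs_duplicate_claims_same_day.py | get_duplicate_same_day_item_frequencies
-- ===== SOURCE A (Python) =====
-- def get_duplicates(ls):
--     seen = set()
--     seen_add = seen.add
--     seen_twice = set( x for x in ls if x in seen or seen_add(x) )
--
--     return list(seen_twice)
--
-- def get_duplicate_same_day_item_frequencies(logger, claims):
--     dos = []
--     items = []
--     for claim in claims:
--         if claim == id:
--             continue
--
--         items.append(claim[1])
--         dos.append(claim[2])
--
--
--     number_of_duplicate_claims = 0
--     days_with_multiple_claims = get_duplicates(dos)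
--     for day in days_with_multiple_claims:
--         occurrences = [i for i, value in enumerate(dos) if value == day]
--         items_on_day = [items[x] for x in occurrences]
--         duplicate_items = get_duplicates(items_on_day)
--         number_of_duplicate_claims = number_of_duplicate_claims + len(duplicate_items)
--
--     return number_of_duplicate_claims
-- ===== SOURCE B (Python) =====
-- def get_duplicate_same_day_item_frequencies(logger, claims):
--     # One pass: count occurrences of each (day, item) pair, then count pairs seen at least twice.
--     counts = {}
--     for claim in claims:
--         key = (claim[2], claim[1])
--         counts[key] = counts.get(key, 0) + 1
--     return sum(1 for v in counts.values() if v >= 2)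
-- ===== Notes on version B (the rewrite author's own statement) =====
-- stated objective: simpler
-- what changed: Replaces A's per-duplicate-day rescans of the whole day list (duplicate detection, index enumeration, item gathering, second duplicate detection) with a single pass that counts each (day, item) pair in one dictionary and then counts the pairs occurring at least twice.
import Mathlib
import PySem

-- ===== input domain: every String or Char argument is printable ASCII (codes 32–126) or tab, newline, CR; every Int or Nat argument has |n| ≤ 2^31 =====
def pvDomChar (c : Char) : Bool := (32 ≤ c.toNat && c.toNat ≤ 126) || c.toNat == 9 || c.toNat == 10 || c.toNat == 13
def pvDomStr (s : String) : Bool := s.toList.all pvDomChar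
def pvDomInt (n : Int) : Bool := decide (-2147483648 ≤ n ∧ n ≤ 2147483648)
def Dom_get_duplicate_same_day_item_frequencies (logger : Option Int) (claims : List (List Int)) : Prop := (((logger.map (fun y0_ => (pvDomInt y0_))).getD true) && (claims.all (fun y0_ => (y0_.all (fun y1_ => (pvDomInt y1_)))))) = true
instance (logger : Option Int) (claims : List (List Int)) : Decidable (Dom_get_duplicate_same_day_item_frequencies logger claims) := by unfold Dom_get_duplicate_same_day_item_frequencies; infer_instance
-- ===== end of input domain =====

-- ===== PORT A =====
-- B replaces A's per-duplicate-day rescans by a single (day,item)-pair counting pass: simpler and shorter.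
-- helper: the module's get_duplicates(ls); 'x in seen or seen_add(x)' adds x to seen and keeps x iff already seen.
-- Its result (and list(seen_twice) below) is consumed only by summation/length, so Python's set order cannot matter.
def pvGetDuplicates (ls : List Int) : List Int :=
  (ls.foldl
    (fun (st : PySem.Set Int × PySem.Set Int) x =>
      if PySem.Set.contains st.1 x then (st.1, PySem.Set.add st.2 x)
      else (PySem.Set.add st.1 x, st.2))
    (PySem.Set.empty, PySem.Set.empty)).2

def get_duplicate_same_day_item_frequencies (logger : Option Int) (claims : List (List Int)) : Int :=
  -- 'if claim == id: continue' compares a list of ints with the builtin function id: always False, nothing is skipped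
  let st := claims.foldl
    (fun (st : List Int × List Int) claim =>
      (st.1 ++ [(PySem.List.pyGet? claim 1).getD 0],
       st.2 ++ [(PySem.List.pyGet? claim 2).getD 0]))
    ([], [])
  let items := st.1
  let dos := st.2
  let days_with_multiple_claims := pvGetDuplicates dos
  days_with_multiple_claims.foldl
    (fun n day =>
      let occurrences := ((PySem.List.enumerate dos).filter (fun iv => iv.2 == day)).map Prod.fst
      let items_on_day := occurrences.map (fun x => (PySem.List.pyGet? items x).getD 0)
      n + ((pvGetDuplicates items_on_day).length : Int))
    0

-- ===== PORT B =====
def get_duplicate_same_day_item_frequencies_alt (logger : Option Int) (claims : List (List Int)) : Int :=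
  let counts := claims.foldl
    (fun (d : PySem.Dict (Int × Int) Int) claim =>
      let key := ((PySem.List.pyGet? claim 2).getD 0, (PySem.List.pyGet? claim 1).getD 0)
      d.insert key (d.getD key 0 + 1))
    PySem.Dict.empty
  (PySem.Dict.values counts).foldl (fun n v => if 2 ≤ v then n + 1 else n) 0

-- ===== PRECONDITION & SPEC =====
-- Pre_ excludes claims containing a row of fewer than 3 entries: there Python's claim[1]/claim[2] raises IndexError (in A and in B alike).
def Pre_get_duplicate_same_day_item_frequencies (logger : Option Int) (claims : List (List Int)) : Prop :=
  ∀ c ∈ claims, 3 ≤ c.length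
instance (logger : Option Int) (claims : List (List Int)) : Decidable (Pre_get_duplicate_same_day_item_frequencies logger claims) := by unfold Pre_get_duplicate_same_day_item_frequencies; infer_instance
def pvWitness_get_duplicate_same_day_item_frequencies : Option Int × List (List Int) := (none, [[7, 1, 2], [8, 1, 2], [9, 1, 2]])

def Spec_get_duplicate_same_day_item_frequencies (logger : Option Int) (claims : List (List Int)) (out : Int) : Prop := out = get_duplicate_same_day_item_frequencies_alt logger claims
instance (logger : Option Int) (claims : List (List Int)) (out : Int) : Decidable (Spec_get_duplicate_same_day_item_frequencies logger claims out) := by unfold Spec_get_duplicate_same_day_item_frequencies; infer_instance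

-- ===== CLAIM (what is proved, stated in full; the proofs are below) =====
def Claim_equal_get_duplicate_same_day_item_frequencies : Prop := ∀ (logger : Option Int) (claims : List (List Int)), Dom_get_duplicate_same_day_item_frequencies logger claims → Pre_get_duplicate_same_day_item_frequencies logger claims → Spec_get_duplicate_same_day_item_frequencies logger claims (get_duplicate_same_day_item_frequencies logger claims)

-- ===== LEMMAS AND PROOFS =====

-- the list of (day, item) pairs both programs extract from claims
def pvPairs (claims : List (List Int)) : List (Int × Int) :=
  claims.map (fun c => ((PySem.List.pyGet? c 2).getD 0, (PySem.List.pyGet? c 1).getD 0))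

-- ---- characterisation of get_duplicates: a Nodup list of exactly the elements occurring >= 2 times ----
lemma pvDup_fold (ls : List Int) : ∀ (seen twice : PySem.Set Int), seen.Nodup → twice.Nodup →
    let r := ls.foldl
      (fun (st : PySem.Set Int × PySem.Set Int) x =>
        if PySem.Set.contains st.1 x then (st.1, PySem.Set.add st.2 x)
        else (PySem.Set.add st.1 x, st.2))
      (seen, twice)
    r.2.Nodup ∧ (∀ x, x ∈ r.2 ↔ x ∈ twice ∨ (x ∈ seen ∧ x ∈ ls) ∨ 2 ≤ ls.count x) := by
  induction ls with
  | nil => intro seen twice _ h2; exact ⟨h2, by simp⟩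
  | cons y t ih =>
    intro seen twice h1 h2
    simp only [List.foldl_cons]
    by_cases hy : y ∈ seen
    · have hc : PySem.Set.contains seen y = true := by simp [PySem.Set.contains, hy]
      simp only [hc, if_true]
      obtain ⟨hn, hm⟩ := ih seen (twice.add y) h1 (PySem.Set.nodup_add twice y h2)
      refine ⟨hn, fun x => ?_⟩
      rw [hm x, PySem.Set.mem_add]
      by_cases hxy : x = y
      · subst hxy
        simp only [List.mem_cons, List.count_cons]
        tauto
      · simp only [List.mem_cons, List.count_cons, if_neg (fun h => hxy (beq_iff_eq.mp h).symm)]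
        tauto
    · have hc : PySem.Set.contains seen y = false := by simp [PySem.Set.contains, hy]
      simp only [hc, Bool.false_eq_true, if_false]
      obtain ⟨hn, hm⟩ := ih (seen.add y) twice (PySem.Set.nodup_add seen y h1) h2
      refine ⟨hn, fun x => ?_⟩
      rw [hm x]
      by_cases hxy : x = y
      · subst hxy
        have hcnt : x ∈ t ↔ 0 < t.count x := (List.count_pos_iff).symm
        simp only [PySem.Set.mem_add, List.mem_cons, List.count_cons, if_pos (beq_self_eq_true x)]
        constructor
        · rintro (h | ⟨-, hx⟩ | h)
          · exact Or.inl h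
          · exact Or.inr (Or.inr (by have := hcnt.mp hx; omega))
          · exact Or.inr (Or.inr (by omega))
        · rintro (h | ⟨hs, -⟩ | h)
          · exact Or.inl h
          · exact absurd hs hy
          · have hx : x ∈ t := hcnt.mpr (by omega)
            exact Or.inr (Or.inl ⟨Or.inr trivial, hx⟩)
      · simp only [PySem.Set.mem_add, List.mem_cons, List.count_cons,
          if_neg (fun h => hxy (beq_iff_eq.mp h).symm)]
        tauto

lemma pvDup_nodup (ls : List Int) : (pvGetDuplicates ls).Nodup :=
  (pvDup_fold ls PySem.Set.empty PySem.Set.empty (by simp [PySem.Set.empty]) (by simp [PySem.Set.empty])).1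

lemma pvDup_mem (ls : List Int) (x : Int) : x ∈ pvGetDuplicates ls ↔ 2 ≤ ls.count x := by
  have h := (pvDup_fold ls PySem.Set.empty PySem.Set.empty (by simp [PySem.Set.empty]) (by simp [PySem.Set.empty])).2 x
  simpa [pvGetDuplicates, PySem.Set.empty] using h

-- ---- the occurrence/index gymnastics of A collapse to a filter over the pair list ----
lemma pvEnumBounds {α : Type} (xs : List α) : ∀ (s : Int) (iv : Int × α), iv ∈ PySem.List.enumerate xs s → s ≤ iv.1 ∧ iv.1 < s + xs.length := by
  induction xs with
  | nil => intro s iv h; simp [PySem.List.enumerate] at h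
  | cons x t ih =>
    intro s iv h
    rw [PySem.List.enumerate_cons] at h
    rcases List.mem_cons.mp h with h | h
    · subst h
      refine ⟨le_refl _, ?_⟩
      show s < s + ((x :: t).length : Int)
      simp only [List.length_cons]
      push_cast
      omega
    · have := ih (s + 1) iv h
      simp only [List.length_cons]
      push_cast at this ⊢
      omega

lemma pvOcc (l : List (Int × Int)) (d : Int) :
    ((((PySem.List.enumerate (l.map Prod.fst)).filter (fun iv => iv.2 == d)).map Prod.fst).map
      (fun x => (PySem.List.pyGet? (l.map Prod.snd) x).getD 0))
    = (l.filter (fun p => p.1 == d)).map Prod.snd := by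
  induction l using List.reverseRecOn with
  | nil => simp
  | append_singleton l p ih =>
    simp only [List.map_append, List.map_cons, List.map_nil, PySem.List.enumerate_append, List.filter_append]
    have hcong : ∀ x ∈ ((PySem.List.enumerate (l.map Prod.fst) 0).filter (fun iv => iv.2 == d)).map Prod.fst,
        (PySem.List.pyGet? (l.map Prod.snd ++ [p.2]) x).getD 0
          = (PySem.List.pyGet? (l.map Prod.snd) x).getD 0 := by
      intro x hx
      rcases List.mem_map.mp hx with ⟨iv, hiv, rfl⟩
      have hb := pvEnumBounds (l.map Prod.fst) 0 iv (List.mem_of_mem_filter hiv)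
      simp only [List.length_map, zero_add] at hb
      obtain ⟨h0, hlt⟩ := hb
      obtain ⟨n, hn⟩ : ∃ n : Nat, iv.1 = (n : Int) := ⟨iv.1.toNat, (Int.toNat_of_nonneg h0).symm⟩
      have hlen : n < (l.map (Prod.snd (α := Int))).length := by
        simp only [List.length_map]
        omega
      rw [hn, PySem.List.pyGet?_natCast, PySem.List.pyGet?_natCast, List.getElem?_append_left hlen]
    rw [List.map_congr_left hcong, ih]
    congr 1
    have hsing : PySem.List.enumerate [p.1] (0 + (l.map (Prod.fst (α := Int))).length)
        = [((l.length : Int), p.1)] := by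
      simp
    rw [hsing]
    by_cases hpd : p.1 = d
    · simp only [List.filter_cons, hpd, beq_self_eq_true, if_true, List.filter_nil,
        List.map_cons, List.map_nil]
      rw [show ((l.length : Int)) = (((l.map (Prod.snd (α := Int))).length : Nat) : Int) by simp,
        PySem.List.pyGet?_natCast]
      simp
    · simp [hpd]

-- ---- counts transfer from filtered item lists / day list to the pair list ----
lemma pvCountItems (ps : List (Int × Int)) (d it : Int) :
    ((ps.filter (fun p => p.1 == d)).map Prod.snd).count it = ps.count (d, it) := by
  simp only [List.count_eq_countP, List.countP_map, List.countP_filter]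
  refine List.countP_congr ?_
  rintro ⟨a, b⟩ _
  simp only [Function.comp_apply]
  by_cases h1 : a = d <;> by_cases h2 : b = it <;> simp [h1, h2]

lemma pvCountDays (ps : List (Int × Int)) (p : Int × Int) :
    ps.count p ≤ (ps.map Prod.fst).count p.1 := by
  simp only [List.count_eq_countP, List.countP_map]
  refine List.countP_mono_left ?_
  intro q _ hq
  simp only [beq_iff_eq] at hq
  simp [hq]

-- ---- the fiber count of each day ----
lemma pvFiber (ps : List (Int × Int)) (d : Int) :
    (pvGetDuplicates ((ps.filter (fun p => p.1 == d)).map Prod.snd)).length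
    = ((ps.toFinset.filter (fun p => 2 ≤ ps.count p)).filter (fun p => p.1 = d)).card := by
  classical
  have hnd : (pvGetDuplicates ((ps.filter (fun p => p.1 == d)).map Prod.snd)).Nodup := pvDup_nodup _
  have hmem : ∀ it, it ∈ pvGetDuplicates ((ps.filter (fun p => p.1 == d)).map Prod.snd) ↔
      2 ≤ ps.count (d, it) := by
    intro it; rw [pvDup_mem, pvCountItems]
  have himg : ((ps.toFinset.filter (fun p => 2 ≤ ps.count p)).filter (fun p => p.1 = d))
      = (pvGetDuplicates ((ps.filter (fun p => p.1 == d)).map Prod.snd)).toFinset.image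
          (fun it => (d, it)) := by
    ext p
    simp only [Finset.mem_filter, Finset.mem_image, List.mem_toFinset, hmem]
    constructor
    · rintro ⟨⟨_, hc⟩, hd⟩
      refine ⟨p.2, ?_, ?_⟩
      · rwa [show ((d, p.2) : Int × Int) = p from Prod.ext hd.symm rfl]
      · exact Prod.ext hd.symm rfl
    · rintro ⟨it, hc, rfl⟩
      exact ⟨⟨List.count_pos_iff.mp (by omega), hc⟩, rfl⟩
  rw [himg, Finset.card_image_of_injective _ (fun a b h => by simpa using h),
    List.toFinset_card_of_nodup hnd]

-- ---- the combinatorial core: summing per-day duplicate counts = counting duplicated pairs ----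
lemma pvCore (ps : List (Int × Int)) :
    ((pvGetDuplicates (ps.map Prod.fst)).map
      (fun d => (pvGetDuplicates ((ps.filter (fun p => p.1 == d)).map Prod.snd)).length)).sum
    = (PySem.Set.ofList ps).countP (fun p => decide (2 ≤ ps.count p)) := by
  classical
  have hDnd : (pvGetDuplicates (ps.map Prod.fst)).Nodup := pvDup_nodup _
  rw [← List.sum_toFinset _ hDnd]
  have h1 : ∑ d ∈ (pvGetDuplicates (ps.map Prod.fst)).toFinset,
      (pvGetDuplicates ((ps.filter (fun p => p.1 == d)).map Prod.snd)).length
      = ∑ d ∈ (pvGetDuplicates (ps.map Prod.fst)).toFinset,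
        (((ps.toFinset.filter (fun p => 2 ≤ ps.count p)).filter (fun p => p.1 = d)).card) :=
    Finset.sum_congr rfl (fun d _ => pvFiber ps d)
  rw [h1]
  have h2 : (ps.toFinset.filter (fun p => 2 ≤ ps.count p)).card
      = ∑ d ∈ (pvGetDuplicates (ps.map Prod.fst)).toFinset,
        (((ps.toFinset.filter (fun p => 2 ≤ ps.count p)).filter (fun p => p.1 = d)).card) := by
    apply Finset.card_eq_sum_card_fiberwise
    intro p hp
    simp only [Finset.mem_coe, Finset.mem_filter, List.mem_toFinset] at hp
    simp only [Finset.mem_coe, List.mem_toFinset, pvDup_mem]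
    calc 2 ≤ ps.count p := hp.2
      _ ≤ (ps.map Prod.fst).count p.1 := pvCountDays ps p
  rw [← h2]
  have hnodup : (PySem.Set.ofList ps).Nodup := PySem.Set.nodup_ofList ps
  rw [List.countP_eq_length_filter, ← List.toFinset_card_of_nodup (hnodup.filter _),
    List.toFinset_filter]
  congr 1
  ext p
  simp [PySem.Set.mem_ofList]

-- ---- each port, rewritten against pvPairs ----
lemma pvA_eq (logger : Option Int) (claims : List (List Int)) :
    get_duplicate_same_day_item_frequencies logger claims
    = (((pvGetDuplicates ((pvPairs claims).map Prod.fst)).map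
        (fun d => (pvGetDuplicates (((pvPairs claims).filter (fun p => p.1 == d)).map Prod.snd)).length)).sum : Int) := by
  simp only [get_duplicate_same_day_item_frequencies]
  rw [PySem.List.foldl_prod_mk
      (f := fun (acc : List Int) claim => acc ++ [(PySem.List.pyGet? claim 1).getD 0])
      (g := fun (acc : List Int) claim => acc ++ [(PySem.List.pyGet? claim 2).getD 0]),
    PySem.List.foldl_append_singleton_eq_map, PySem.List.foldl_append_singleton_eq_map]
  simp only [List.nil_append]
  have hitems : claims.map (fun claim => (PySem.List.pyGet? claim 1).getD 0)
      = (pvPairs claims).map Prod.snd := by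
    simp [pvPairs, List.map_map, Function.comp_def]
  have hdos : claims.map (fun claim => (PySem.List.pyGet? claim 2).getD 0)
      = (pvPairs claims).map Prod.fst := by
    simp [pvPairs, List.map_map, Function.comp_def]
  rw [hitems, hdos]
  have hbody : ∀ (n : Int) (day : Int),
      n + (((pvGetDuplicates
          ((((PySem.List.enumerate ((pvPairs claims).map Prod.fst)).filter
              (fun iv => iv.2 == day)).map Prod.fst).map
            (fun x => (PySem.List.pyGet? ((pvPairs claims).map Prod.snd) x).getD 0))).length : Int))
      = n + (((pvGetDuplicates (((pvPairs claims).filter (fun p => p.1 == day)).map Prod.snd)).length : Int)) := by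
    intro n day
    rw [pvOcc]
  rw [PySem.List.foldl_congr_mem _ _ (fun n day =>
      n + (((pvGetDuplicates (((pvPairs claims).filter (fun p => p.1 == day)).map Prod.snd)).length : Int))) _
      (fun n day hd => hbody n day)]
  rw [PySem.List.foldl_add (g := fun day =>
      ((pvGetDuplicates (((pvPairs claims).filter (fun p => p.1 == day)).map Prod.snd)).length : Int))]
  rw [zero_add, Nat.cast_list_sum, List.map_map]
  rfl

lemma pvB_eq (logger : Option Int) (claims : List (List Int)) :
    get_duplicate_same_day_item_frequencies_alt logger claims
    = ((PySem.Set.ofList (pvPairs claims)).countP (fun p => decide (2 ≤ (pvPairs claims).count p)) : Int) := by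
  simp only [get_duplicate_same_day_item_frequencies_alt]
  have hfold : claims.foldl
      (fun (d : PySem.Dict (Int × Int) Int) claim =>
        d.insert ((PySem.List.pyGet? claim 2).getD 0, (PySem.List.pyGet? claim 1).getD 0)
          (d.getD ((PySem.List.pyGet? claim 2).getD 0, (PySem.List.pyGet? claim 1).getD 0) 0 + 1))
      PySem.Dict.empty
      = PySem.Dict.counter (pvPairs claims) := by
    rw [← PySem.Dict.foldl_insert_getD_add_one_eq_counter, pvPairs, List.foldl_map]
  rw [hfold]
  rw [PySem.List.foldl_ite_add_one (p := fun v : Int => 2 ≤ v)]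
  rw [zero_add]
  congr 1
  have hv : PySem.Dict.values (PySem.Dict.counter (pvPairs claims))
      = ((PySem.Set.ofList (pvPairs claims)).map
          (fun k => ((pvPairs claims).count k : Int))) := by
    show (PySem.Dict.counter (pvPairs claims)).items.map Prod.snd = _
    rw [PySem.Dict.items_counter, List.map_map]
    rfl
  rw [hv, List.countP_map]
  refine List.countP_congr ?_
  intro k _
  simp only [Function.comp_apply, decide_eq_true_eq]
  exact_mod_cast Iff.rfl

-- ===== VERDICT (by name: the statement is the Claim_ definition above) =====
theorem get_duplicate_same_day_item_frequencies_spec : Claim_equal_get_duplicate_same_day_item_frequencies := by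
  intro logger claims _ _
  unfold Spec_get_duplicate_same_day_item_frequencies
  rw [pvA_eq, pvB_eq, pvCore]
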